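-- pv_equiv track=rewrite | github.com/alibaba/AILens | backend/app/tracing/traceql/parser.py | _split_conditions
-- ===== SOURCE A (Python) =====
-- from typing import List, Optional, Union
--
-- def _split_conditions(conditions_str: str) -> List[str]:
--     """Split conditions by && operator."""
--     # Current implementation handles simple AND conditions (&&)
--     # NOTE: Does not support OR (||) operations or complex nested parentheses
--     # Future enhancement needed for: (field1 = val1 || field2 = val2) && field3 = val3
--     parts = []
--     current = ""
--     i = 0
--
--     while i < len(conditions_str):
--         if i < len(conditions_str) - 1 and conditions_str[i : i + 2] == "&&":
--             parts.append(current.strip())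
--             current = ""
--             i += 2
--             while i < len(conditions_str) and conditions_str[i] == " ":
--                 i += 1
--         else:
--             current += conditions_str[i]
--             i += 1
--
--     if current.strip():
--         parts.append(current.strip())
--
--     return parts
-- ===== SOURCE B (Python) =====
-- from typing import List
--
--
-- def _split_conditions(conditions_str: str) -> List[str]:
--     """Split conditions by && operator."""
--     stripped = [p.strip() for p in conditions_str.split("&&")]
--     if stripped and stripped[-1] == "":
--         stripped.pop()
--     return stripped
-- ===== Notes on version B (the rewrite author's own statement) =====
-- stated objective: faster
-- what changed: Replaced the hand-written index/accumulator character scanner (whose current += char concatenation is quadratic) by one library split on the operator, a strip comprehension, and a single trailing-empty-segment pop.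
import Mathlib
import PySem

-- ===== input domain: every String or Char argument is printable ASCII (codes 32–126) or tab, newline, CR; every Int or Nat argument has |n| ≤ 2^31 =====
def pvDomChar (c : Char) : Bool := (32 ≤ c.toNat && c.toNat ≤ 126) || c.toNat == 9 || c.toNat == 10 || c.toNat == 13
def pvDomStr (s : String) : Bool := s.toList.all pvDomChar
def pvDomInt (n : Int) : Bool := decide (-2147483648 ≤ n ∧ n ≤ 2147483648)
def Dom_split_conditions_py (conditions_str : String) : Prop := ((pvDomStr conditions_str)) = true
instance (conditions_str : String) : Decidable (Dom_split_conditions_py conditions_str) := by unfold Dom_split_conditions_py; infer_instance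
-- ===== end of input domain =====

-- B replaces A's hand-written index/accumulator character scanner (quadratic `current += c`
-- concatenation) by one split("&&"), a strip of each piece, and a single trailing-empty-segment
-- drop (objective: faster, measured).


-- ===== PORT A =====
-- A's while-loop over index i, accumulating `current` and `parts`; the test
-- `i < len-1 and s[i:i+2] == "&&"` is exactly "the next two characters are '&'",
-- i.e. c = '&' ∧ rest.head? = some '&'; the inner space-skipping while is dropWhile (· == ' ').
def pvALoop (cs : List Char) (cur : List Char) (parts : List String) : List String :=
  match cs with
  | [] =>
      -- `if current.strip():` — Python truthiness of a string = nonempty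
      if PySem.Chars.strip cur ≠ [] then parts ++ [String.ofList (PySem.Chars.strip cur)]
      else parts
  | c :: rest =>
      if c = '&' ∧ rest.head? = some '&' then
        pvALoop (List.dropWhile (· == ' ') rest.tail) []
          (parts ++ [String.ofList (PySem.Chars.strip cur)])
      else
        pvALoop rest (cur ++ [c]) parts
termination_by cs.length
decreasing_by
  · have h := List.length_dropWhile_le (fun c => c == ' ') rest.tail
    have h2 : rest.tail.length ≤ rest.length := by cases rest <;> simp
    simp only [List.length_cons]; omega
  · simp only [List.length_cons]; omega

def split_conditions_py (conditions_str : String) : List String :=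
  pvALoop conditions_str.toList [] []

-- ===== PORT B =====
-- Source B: stripped = [p.strip() for p in s.split("&&")]; drop a trailing "" (pop); return.
-- s.split("&&") with the non-empty literal separator is PySem.Chars.splitOn (the sep ≠ "" form).
def split_conditions_py_alt (conditions_str : String) : List String :=
  let stripped := (PySem.Chars.splitOn conditions_str.toList "&&".toList).map
      (fun p => String.ofList (PySem.Chars.strip p))
  if stripped.getLast? = some "" then stripped.dropLast else stripped

-- ===== PRECONDITION & SPEC =====
def Spec_split_conditions_py (conditions_str : String) (out : List String) : Prop := out = split_conditions_py_alt conditions_str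
instance (conditions_str : String) (out : List String) : Decidable (Spec_split_conditions_py conditions_str out) := by unfold Spec_split_conditions_py; infer_instance

-- ===== CLAIM (what is proved, stated in full; the proofs are below) =====
def Claim_equal_split_conditions_py : Prop := ∀ (conditions_str : String), Dom_split_conditions_py conditions_str → Spec_split_conditions_py conditions_str (split_conditions_py conditions_str)

-- ===== LEMMAS AND PROOFS =====

-- prepend p onto the first segment of a segment list
def pvPrepend (p : List Char) : List (List Char) → List (List Char)
  | s :: ss => (p ++ s) :: ss
  | [] => [p]

-- structural split on "&&"
def pvSplitAmp : List Char → List (List Char)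
  | [] => [[]]
  | c :: rest =>
      if c = '&' ∧ rest.head? = some '&' then [] :: pvSplitAmp rest.tail
      else pvPrepend [c] (pvSplitAmp rest)
termination_by l => l.length
decreasing_by
  · cases rest <;> simp
  · simp

-- strip each segment, then drop a trailing empty
def pvStripF (p : List Char) : String := String.ofList (PySem.Chars.strip p)
def pvPostS (st : List String) : List String :=
  if st.getLast? = some "" then st.dropLast else st

theorem pvPrepend_ne_nil (p : List Char) (l : List (List Char)) : pvPrepend p l ≠ [] := by
  cases l <;> simp [pvPrepend]

theorem pvSplitAmp_ne_nil (cs : List Char) : pvSplitAmp cs ≠ [] := by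
  induction cs using pvSplitAmp.induct with
  | case1 => simp [pvSplitAmp]
  | case2 c rest h ih => simp [pvSplitAmp, h]
  | case3 c rest h ih => simp [pvSplitAmp, h]; exact pvPrepend_ne_nil _ _

theorem pvPrepend_nil (l : List (List Char)) (h : l ≠ []) : pvPrepend [] l = l := by
  cases l with
  | nil => exact absurd rfl h
  | cons s ss => simp [pvPrepend]

theorem pvPrepend_prepend (p q : List Char) (l : List (List Char)) :
    pvPrepend p (pvPrepend q l) = pvPrepend (p ++ q) l := by
  cases l <;> simp [pvPrepend]

-- characterisation of PySem's splitOn.go for the separator "&&"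
theorem pvGo_eq (fuel : Nat) (l cur : List Char) (acc : List (List Char))
    (h : l.length ≤ fuel) :
    PySem.Chars.splitOn.go ['&', '&'] fuel l cur acc
      = acc.reverse ++ pvPrepend cur.reverse (pvSplitAmp l) := by
  induction fuel generalizing l cur acc with
  | zero =>
      have hl : l = [] := by cases l <;> simp_all
      subst hl
      simp [PySem.Chars.splitOn.go, pvSplitAmp, pvPrepend]
  | succ fuel ih =>
      cases l with
      | nil => simp [PySem.Chars.splitOn.go, pvSplitAmp, pvPrepend]
      | cons c rest =>
          by_cases hc : c = '&' ∧ rest.head? = some '&'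
          · obtain ⟨hc1, hc2⟩ := hc
            subst hc1
            cases rest with
            | nil => simp at hc2
            | cons c2 rt =>
                have hc2' : c2 = '&' := by simpa using hc2
                subst hc2'
                rw [PySem.Chars.splitOn.go]
                have hpre : List.isPrefixOf ['&','&'] ('&' :: '&' :: rt) = true := by
                  simp [List.isPrefixOf]
                simp only [hpre, if_true]
                have hdrop : List.drop (['&','&'] : List Char).length ('&' :: '&' :: rt) = rt := rfl
                rw [hdrop, ih rt [] (cur.reverse :: acc) (by simp at h; omega)]
                simp only [List.reverse_nil]
                rw [pvPrepend_nil _ (pvSplitAmp_ne_nil rt)]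
                have : pvSplitAmp ('&' :: '&' :: rt) = [] :: pvSplitAmp rt := by
                  rw [pvSplitAmp]; simp
                rw [this]
                simp [pvPrepend]
          · have hpre : List.isPrefixOf ['&','&'] (c :: rest) = false := by
              cases rest with
              | nil => simp [List.isPrefixOf]
              | cons c2 rt =>
                  simp only [List.isPrefixOf, Bool.and_eq_false_iff]
                  by_cases h1 : c = '&'
                  · subst h1
                    have : c2 ≠ '&' := by
                      intro hcontra; exact hc ⟨rfl, by simp [hcontra]⟩
                    right; left; simpa using (Ne.symm this)
                  · left; simpa using (Ne.symm h1)
            rw [PySem.Chars.splitOn.go]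
            simp only [hpre, Bool.false_eq_true, if_false]
            rw [ih rest (c :: cur) acc (by simp at h; omega)]
            have : pvSplitAmp (c :: rest) = pvPrepend [c] (pvSplitAmp rest) := by
              rw [pvSplitAmp]; simp [hc]
            rw [this, List.reverse_cons, pvPrepend_prepend]

theorem pvSplitOn_eq (cs : List Char) :
    PySem.Chars.splitOn cs ['&', '&'] = pvSplitAmp cs := by
  unfold PySem.Chars.splitOn
  rw [pvGo_eq cs.length.succ cs [] [] (by omega)]
  simp [pvPrepend_nil _ (pvSplitAmp_ne_nil cs)]

theorem pvStrip_space_cons (s : List Char) :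
    PySem.Chars.strip (' ' :: s) = PySem.Chars.strip s := by
  have hsp : PySem.Chars.isspace ' ' = true := by decide
  simp [PySem.Chars.strip, PySem.Chars.lstrip, List.dropWhile, hsp]

theorem pvMap_strip_dropSpaces (r : List Char) :
    (pvSplitAmp (List.dropWhile (· == ' ') r)).map pvStripF
      = (pvSplitAmp r).map pvStripF := by
  induction r with
  | nil => rfl
  | cons c r ih =>
      by_cases hc : c = ' '
      · subst hc
        rw [List.dropWhile]
        simp only [beq_self_eq_true]
        rw [ih]
        have hne : (' ' = '&' ∧ r.head? = some '&') = False := by simp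
        have : pvSplitAmp (' ' :: r) = pvPrepend [' '] (pvSplitAmp r) := by
          rw [pvSplitAmp]; simp
        rw [this]
        cases hsp : pvSplitAmp r with
        | nil => exact absurd hsp (pvSplitAmp_ne_nil r)
        | cons s ss =>
            simp [pvPrepend, pvStripF, pvStrip_space_cons]
      · have hcf : (c == ' ') = false := by simpa using hc
        simp only [List.dropWhile, hcf]

theorem pvPostS_cons (a : String) (l : List String) (h : l ≠ []) :
    pvPostS (a :: l) = a :: pvPostS l := by
  cases l with
  | nil => exact absurd rfl h
  | cons b l' => simp [pvPostS, List.getLast?_cons_cons]; split_ifs <;> simp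

theorem pvALoop_eq (cs cur : List Char) (parts : List String) :
    pvALoop cs cur parts
      = parts ++ pvPostS ((pvPrepend cur (pvSplitAmp cs)).map pvStripF) := by
  have h1 : pvSplitAmp [] = [[]] := by rw [pvSplitAmp]
  induction cs, cur, parts using pvALoop.induct with
  | case1 cur parts hcur =>
      rw [pvALoop, if_pos hcur, h1]
      simp only [pvPrepend, List.append_nil, List.map]
      simp [pvPostS, pvStripF, hcur]
  | case2 cur parts hcur =>
      rw [pvALoop, if_neg hcur, h1]
      simp only [not_not] at hcur
      simp only [pvPrepend, List.append_nil, List.map]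
      have : pvStripF cur = "" := by simp [pvStripF, hcur]
      simp [pvPostS, this]
  | case3 cur parts c rest h ih =>
      rw [pvALoop, if_pos h]
      rw [ih]
      rw [pvPrepend_nil _ (pvSplitAmp_ne_nil _)]
      rw [pvMap_strip_dropSpaces]
      have h2 : pvSplitAmp (c :: rest) = [] :: pvSplitAmp rest.tail := by
        rw [pvSplitAmp]; simp [h]
      rw [h2]
      cases hsp : pvSplitAmp rest.tail with
      | nil => exact absurd hsp (pvSplitAmp_ne_nil _)
      | cons s ss =>
          simp only [pvPrepend, List.append_nil, List.map]
          rw [pvPostS_cons (pvStripF cur) (pvStripF s :: List.map pvStripF ss) (by simp)]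
          simp [pvStripF]
  | case4 cur parts c rest h ih =>
      rw [pvALoop, if_neg h]
      rw [ih]
      have h2 : pvSplitAmp (c :: rest) = pvPrepend [c] (pvSplitAmp rest) := by
        rw [pvSplitAmp]; simp [h]
      rw [h2, pvPrepend_prepend]

theorem pvMain (s : String) : split_conditions_py s = split_conditions_py_alt s := by
  unfold split_conditions_py split_conditions_py_alt
  rw [pvALoop_eq]
  rw [pvPrepend_nil _ (pvSplitAmp_ne_nil _)]
  have : "&&".toList = ['&', '&'] := by decide
  rw [this, pvSplitOn_eq]
  rfl

-- ===== VERDICT (by name: the statement is the Claim_ definition above) =====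
theorem split_conditions_py_spec : Claim_equal_split_conditions_py := by
  intro s _
  unfold Spec_split_conditions_py
  exact pvMain s
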